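-- pv_equiv track=rewrite | github.com/piccolomo/peaky | peaky/_main.py | _old_var
-- ===== SOURCE A (Python) =====
-- def _old_var(new_var, var): #where var is None, old_
--     old = [0] * len(var)
--     j = 0
--     for i in range(len(var)):
--         if var[i] == None:
--             old[i] = new_var[j]
--             j += 1
--         else:
--             old[i] = var[i]
--     return old
-- ===== SOURCE B (Python) =====
-- def _old_var(new_var, var):
--     # Split var into the maximal runs of non-None values, then stitch the runs
--     # back together with the replacement values interleaved at the seams.
--     runs = []
--     cur = []
--     for v in var:
--         if v == None:
--             runs.append(cur)
--             cur = []
--         else: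
--             cur.append(v)
--     runs.append(cur)
--     out = runs[0]
--     for val, run in zip(new_var, runs[1:]):
--         out.append(val)
--         out.extend(run)
--     return out
-- ===== Notes on version B (the rewrite author's own statement) =====
-- stated objective: alternative
-- what changed: Instead of A's index-driven pass that writes every slot of a preallocated zero list while advancing a counter, B segments var into the maximal runs of non-None values and then rebuilds the result by interleaving those runs with the new_var values via zip.
import Mathlib
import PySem

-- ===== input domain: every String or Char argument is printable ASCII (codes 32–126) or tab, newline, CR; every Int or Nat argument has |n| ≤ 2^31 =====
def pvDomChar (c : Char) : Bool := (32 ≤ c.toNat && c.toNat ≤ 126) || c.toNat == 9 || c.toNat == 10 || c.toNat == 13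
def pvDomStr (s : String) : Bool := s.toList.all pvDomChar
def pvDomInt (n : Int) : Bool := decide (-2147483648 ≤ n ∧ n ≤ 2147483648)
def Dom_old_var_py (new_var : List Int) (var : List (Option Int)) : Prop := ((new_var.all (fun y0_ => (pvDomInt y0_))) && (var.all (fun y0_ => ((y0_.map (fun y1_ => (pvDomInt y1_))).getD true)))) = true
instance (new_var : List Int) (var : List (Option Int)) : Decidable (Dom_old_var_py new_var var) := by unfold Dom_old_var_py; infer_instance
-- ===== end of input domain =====

-- B segments var into the maximal runs of non-None values and rebuilds the result by
-- interleaving those runs with the new_var values via zip; alternative algorithm, same cost.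

-- ===== PORT A =====
-- A: old = [0]*len(var); counter j; one pass over range(len(var)) assigning old[i].
-- new_var[j] is ported with getD; Pre_ excludes the inputs where Python raises IndexError.
def old_var_py (new_var : List Int) (var : List (Option Int)) : List Int :=
  let old := List.replicate var.length (0 : Int)
  let res := (List.range var.length).foldl
    (fun (st : List Int × Nat) i =>
      if var.getD i none = none then
        (st.1.set i (new_var.getD st.2 0), st.2 + 1)
      else
        (st.1.set i ((var.getD i none).getD 0), st.2))
    (old, 0)
  res.1

-- ===== PORT B =====
-- B: one pass splitting var into runs (state = (finished runs, current run));
-- runs.append(cur) after the loop; then out = runs[0] and a zip pass stitching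
-- out = out + [val] + run for val, run in zip(new_var, runs[1:]).
def old_var_py_alt (new_var : List Int) (var : List (Option Int)) : List Int :=
  let p := var.foldl
    (fun (s : List (List Int) × List Int) v =>
      match v with
      | none => (s.1 ++ [s.2], [])
      | some x => (s.1, s.2 ++ [x]))
    ([], [])
  let runs := p.1 ++ [p.2]
  (new_var.zip (runs.drop 1)).foldl
    (fun out q => out ++ [q.1] ++ q.2) (runs.headD [])

-- ===== PRECONDITION & SPEC =====
-- Pre_ excludes exactly the inputs where Python A raises IndexError (new_var shorter than
-- the number of None slots in var).
def Pre_old_var_py (new_var : List Int) (var : List (Option Int)) : Prop :=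
  var.countP (fun v => decide (v = none)) ≤ new_var.length
instance (new_var : List Int) (var : List (Option Int)) : Decidable (Pre_old_var_py new_var var) := by unfold Pre_old_var_py; infer_instance
def pvWitness_old_var_py : List Int × List (Option Int) := ([7, 8], [none, some 3, none])

def Spec_old_var_py (new_var : List Int) (var : List (Option Int)) (out : List Int) : Prop := out = old_var_py_alt new_var var
instance (new_var : List Int) (var : List (Option Int)) (out : List Int) : Decidable (Spec_old_var_py new_var var out) := by unfold Spec_old_var_py; infer_instance

-- ===== CLAIM (what is proved, stated in full; the proofs are below) =====
def Claim_equal_old_var_py : Prop := ∀ (new_var : List Int) (var : List (Option Int)), Dom_old_var_py new_var var → Pre_old_var_py new_var var → Spec_old_var_py new_var var (old_var_py new_var var)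

-- ===== LEMMAS AND PROOFS =====

-- the common intermediate: replace each None by the next new_var value, in order
def pvFill (nv : List Int) : List (Option Int) → List Int
  | [] => []
  | none :: vs => nv.getD 0 0 :: pvFill (nv.drop 1) vs
  | some x :: vs => x :: pvFill nv vs

-- number of None slots among the first n entries of var
def pvCnt (var : List (Option Int)) (n : Nat) : Nat :=
  (var.take n).countP (fun v => decide (v = none))

-- the pointwise value of A's output at position i
def pvVal (nv : List Int) (var : List (Option Int)) (i : Nat) : Int :=
  if var.getD i none = none then nv.getD (pvCnt var i) 0 else (var.getD i none).getD 0

-- the runs of non-None values, first run prefixed by cur (B's split pass, recursively)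
def pvSplit (cur : List Int) : List (Option Int) → List (List Int)
  | [] => [cur]
  | none :: vs => cur :: pvSplit [] vs
  | some x :: vs => pvSplit (cur ++ [x]) vs

-- B's stitch pass on a runs list
def pvJoin (nv : List Int) (rs : List (List Int)) : List Int :=
  match rs with
  | [] => []
  | r :: rest => (nv.zip rest).foldl (fun out q => out ++ [q.1] ++ q.2) r

theorem pv_set_map_range {α : Type} (L n : Nat) (f : Nat → α) (a : α) :
    ((List.range L).map f).set n a
      = (List.range L).map (fun i => if i = n then a else f i) := by
  apply List.ext_getElem
  · simp
  · intro j h1 h2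
    simp only [List.getElem_set, List.getElem_map, List.getElem_range]
    split_ifs with h h' h'
    · rfl
    · omega
    · omega
    · rfl

theorem pv_getD_eq_of_lt {α : Type} (l : List α) (d : α) {n : Nat} (h : n < l.length) :
    l.getD n d = l[n] := by
  simp [List.getD_eq_getElem?_getD, List.getElem?_eq_getElem h]

theorem pvCnt_succ (var : List (Option Int)) (n : Nat) (hn : n < var.length) :
    pvCnt var (n + 1)
      = pvCnt var n + (if var.getD n none = none then 1 else 0) := by
  unfold pvCnt
  rw [List.take_add_one, List.countP_append, List.getElem?_eq_getElem hn]
  rw [pv_getD_eq_of_lt var none hn]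
  by_cases h : var[n] = none <;> simp [h]

-- invariant of A's loop: after the first n indices the list holds the final value
-- below n and 0 above, and the counter holds the number of Nones seen
theorem pvA_inv (nv : List Int) (var : List (Option Int)) :
    ∀ n, n ≤ var.length →
    (List.range n).foldl
      (fun (st : List Int × Nat) i =>
        if var.getD i none = none then
          (st.1.set i (nv.getD st.2 0), st.2 + 1)
        else
          (st.1.set i ((var.getD i none).getD 0), st.2))
      (List.replicate var.length (0 : Int), 0)
    = ((List.range var.length).map (fun i => if i < n then pvVal nv var i else 0),
       pvCnt var n) := by
  intro n
  induction n with
  | zero =>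
    intro _
    simp [pvCnt, List.map_const']
  | succ n ih =>
    intro hn
    have hn' : n ≤ var.length := by omega
    have hlt : n < var.length := by omega
    rw [List.range_succ, List.foldl_append, ih hn']
    simp only [List.foldl_cons, List.foldl_nil]
    rw [pvCnt_succ var n hlt]
    by_cases h : var.getD n none = none
    · simp only [h, if_true]
      rw [Prod.mk.injEq]
      refine ⟨?_, ?_⟩
      · rw [pv_set_map_range]
        apply List.map_congr_left
        intro i hi
        rw [List.mem_range] at hi
        by_cases hin : i = n
        · subst hin
          simp [pvVal, ← List.getD_eq_getElem?_getD, h]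
        · have : (i < n + 1) ↔ (i < n) := by omega
          simp [← List.getD_eq_getElem?_getD, hin, this]
      · simp
    · simp only [h, if_false]
      rw [Prod.mk.injEq]
      refine ⟨?_, ?_⟩
      · rw [pv_set_map_range]
        apply List.map_congr_left
        intro i hi
        rw [List.mem_range] at hi
        by_cases hin : i = n
        · subst hin
          simp [pvVal, ← List.getD_eq_getElem?_getD, h]
        · have : (i < n + 1) ↔ (i < n) := by omega
          simp [← List.getD_eq_getElem?_getD, hin, this]
      · simp

theorem pvA_char (nv : List Int) (var : List (Option Int)) :
    old_var_py nv var = (List.range var.length).map (pvVal nv var) := by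
  show (List.foldl
      (fun (st : List Int × Nat) i =>
        if var.getD i none = none then
          (st.1.set i (nv.getD st.2 0), st.2 + 1)
        else
          (st.1.set i ((var.getD i none).getD 0), st.2))
      (List.replicate var.length (0 : Int), 0) (List.range var.length)).1
    = List.map (pvVal nv var) (List.range var.length)
  rw [pvA_inv nv var var.length (le_refl _)]
  apply List.map_congr_left
  intro i hi
  rw [List.mem_range] at hi
  simp [hi]

theorem pvVal_shift (nv : List Int) (v : Option Int) (vs : List (Option Int)) (i : Nat) :
    pvVal nv (v :: vs) (i + 1)
      = pvVal (if v = none then nv.drop 1 else nv) vs i := by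
  unfold pvVal pvCnt
  by_cases h : v = none
  · subst h
    simp [List.getD, List.getD_eq_getElem?_getD, Nat.add_comm]
  · simp [List.getD, h]

theorem pv_map_eq_fill (nv : List Int) (var : List (Option Int)) :
    (List.range var.length).map (pvVal nv var) = pvFill nv var := by
  induction var generalizing nv with
  | nil => simp [pvFill]
  | cons v vs ih =>
    rw [List.length_cons, List.range_succ_eq_map, List.map_cons, List.map_map]
    have h0 : pvVal nv (v :: vs) 0
        = match v with | none => nv.getD 0 0 | some x => x := by
      cases v <;> simp [pvVal, pvCnt, List.getD]
    have hs : (pvVal nv (v :: vs)) ∘ Nat.succ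
        = pvVal (if v = none then nv.drop 1 else nv) vs := by
      funext i
      exact pvVal_shift nv v vs i
    rw [h0, hs]
    cases v with
    | none => simp [pvFill, ih]
    | some x => simp [pvFill, ih]

theorem pvSplit_ne_nil (cur : List Int) (vs : List (Option Int)) :
    pvSplit cur vs ≠ [] := by
  induction vs generalizing cur with
  | nil => simp [pvSplit]
  | cons v vs ih =>
    cases v with
    | none => simp [pvSplit]
    | some x => simpa [pvSplit] using ih (cur ++ [x])

theorem pvJoin_prefix (nv : List Int) (a r : List Int) (rs : List (List Int)) :
    pvJoin nv ((a ++ r) :: rs) = a ++ pvJoin nv (r :: rs) := by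
  unfold pvJoin
  induction rs generalizing nv a r with
  | nil => simp
  | cons s rs ih =>
    cases nv with
    | nil => simp
    | cons x nv =>
      simp only [List.zip_cons_cons, List.foldl_cons]
      have := ih nv a (r ++ [x] ++ s)
      simpa [List.append_assoc] using this

-- under Pre_ the zip never truncates, and the stitched runs equal the direct fill
theorem pv_fill_eq_join (vs : List (Option Int)) :
    ∀ (cur nv : List Int),
      vs.countP (fun v => decide (v = none)) ≤ nv.length →
      cur ++ pvFill nv vs = pvJoin nv (pvSplit cur vs) := by
  induction vs with
  | nil => intro cur nv _; simp [pvFill, pvSplit, pvJoin]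
  | cons v vs ih =>
    intro cur nv hc
    cases v with
    | some x =>
      have hc' : vs.countP (fun v => decide (v = none)) ≤ nv.length := by
        simpa using hc
      have := ih (cur ++ [x]) nv hc'
      simpa [pvFill, pvSplit, List.append_assoc] using this
    | none =>
      cases nv with
      | nil => simp at hc
      | cons y nv =>
        have hc' : vs.countP (fun v => decide (v = none)) ≤ nv.length := by
          simp at hc; omega
        have ihh := ih ([] : List Int) nv hc'
        obtain ⟨r0, rs, hr⟩ : ∃ r0 rs, pvSplit ([] : List Int) vs = r0 :: rs := by
          cases h : pvSplit ([] : List Int) vs with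
          | nil => exact absurd h (pvSplit_ne_nil _ _)
          | cons a b => exact ⟨a, b, rfl⟩
        rw [hr] at ihh
        simp only [List.nil_append] at ihh
        show cur ++ (y :: pvFill nv vs) = pvJoin (y :: nv) (cur :: pvSplit [] vs)
        rw [hr]
        show cur ++ (y :: pvFill nv vs)
          = ((y :: nv).zip (r0 :: rs)).foldl (fun out q => out ++ [q.1] ++ q.2) cur
        rw [List.zip_cons_cons, List.foldl_cons]
        have : ((cur ++ [y] ++ r0) :: rs : List (List Int)) = ((cur ++ [y]) ++ r0) :: rs := by
          simp [List.append_assoc]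
        calc cur ++ (y :: pvFill nv vs)
            = (cur ++ [y]) ++ pvJoin nv (r0 :: rs) := by
              rw [← ihh]; simp
          _ = pvJoin nv (((cur ++ [y]) ++ r0) :: rs) := (pvJoin_prefix nv (cur ++ [y]) r0 rs).symm
          _ = (nv.zip rs).foldl (fun out q => out ++ [q.1] ++ q.2) (cur ++ [y] ++ r0) := by
              simp [pvJoin, List.append_assoc]

-- B's split loop, related to pvSplit
theorem pvB_split (vs : List (Option Int)) :
    ∀ (done : List (List Int)) (cur : List Int),
      (vs.foldl
        (fun (s : List (List Int) × List Int) v =>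
          match v with
          | none => (s.1 ++ [s.2], [])
          | some x => (s.1, s.2 ++ [x]))
        (done, cur)).1
      ++ [(vs.foldl
        (fun (s : List (List Int) × List Int) v =>
          match v with
          | none => (s.1 ++ [s.2], [])
          | some x => (s.1, s.2 ++ [x]))
        (done, cur)).2]
      = done ++ pvSplit cur vs := by
  induction vs with
  | nil => intro done cur; simp [pvSplit]
  | cons v vs ih =>
    intro done cur
    cases v with
    | none => simpa [pvSplit, List.append_assoc] using ih (done ++ [cur]) []
    | some x => simpa [pvSplit] using ih done (cur ++ [x])

theorem pvB_char (nv : List Int) (var : List (Option Int)) :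
    old_var_py_alt nv var = pvJoin nv (pvSplit [] var) := by
  simp only [old_var_py_alt]
  have h := pvB_split var [] []
  simp only [List.nil_append] at h
  obtain ⟨r0, rs, hr⟩ : ∃ r0 rs, pvSplit ([] : List Int) var = r0 :: rs := by
    cases hh : pvSplit ([] : List Int) var with
    | nil => exact absurd hh (pvSplit_ne_nil _ _)
    | cons a b => exact ⟨a, b, rfl⟩
  rw [hr] at h ⊢
  rw [h]
  simp [pvJoin]

-- ===== VERDICT (by name: the statement is the Claim_ definition above) =====
theorem old_var_py_spec : Claim_equal_old_var_py := by
  intro new_var var _ hpre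
  unfold Spec_old_var_py
  rw [pvA_char, pv_map_eq_fill, pvB_char]
  have := pv_fill_eq_join var [] new_var hpre
  simpa using this
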